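-- pv_equiv track=rewrite | github.com/joserapa98/tensorkrowch | tensorkrowch/utils.py | enum_repeated_names
-- ===== SOURCE A (Python) =====
-- from typing import Optional, List, Sequence, Text, Union
--
-- def erase_enum(name: Text) -> Text:
--     """
--     Given a name, returns the same name without any enumeration suffix with
--     format ``_{digit}``.
--     """
--     name_list = name.split('_')
--     i = len(name_list) - 1
--     while i >= 0:
--         if name_list[i].isdigit():
--             i -= 1
--         else:
--             break
--     new_name = '_'.join(name_list[:i + 1])
--     return new_name
--
-- def enum_repeated_names(names_list: List[Text]) -> List[Text]:
--     """
--     Given a list of (axes or nodes) names, returns the same list but adding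
--     an enumeration for the names that appear more than once in the list.
--     """
--     counts = dict()
--     aux_list = []
--     for name in names_list:
--         name = erase_enum(name)
--         aux_list.append(name)
--         if name in counts:
--             counts[name] += 1
--         else:
--             counts[name] = 0
--
--     for name in counts:
--         if counts[name] == 0:
--             counts[name] = -1
--
--     aux_list.reverse()
--     for i, name in enumerate(aux_list):
--         if counts[name] >= 0:
--             aux_list[i] = f'{name}_{counts[name]}'
--             counts[name] -= 1
--     aux_list.reverse()
--     return aux_list
-- ===== SOURCE B (Python) =====
-- from typing import List, Text
--
-- def erase_enum(name: Text) -> Text: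
--     """
--     Given a name, returns the same name without any enumeration suffix with
--     format ``_{digit}``.
--     """
--     name_list = name.split('_')
--     i = len(name_list) - 1
--     while i >= 0:
--         if name_list[i].isdigit():
--             i -= 1
--         else:
--             break
--     new_name = '_'.join(name_list[:i + 1])
--     return new_name
--
-- def enum_repeated_names(names_list: List[Text]) -> List[Text]:
--     """
--     Given a list of (axes or nodes) names, returns the same list but adding
--     an enumeration for the names that appear more than once in the list.
--     """
--     totals = {}
--     for name in names_list:
--         base = erase_enum(name)
--         totals[base] = totals.get(base, 0) + 1
--     seen = {}
--     result = []
--     for name in names_list: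
--         base = erase_enum(name)
--         if totals[base] == 1:
--             result.append(base)
--         else:
--             k = seen.get(base, 0)
--             result.append(f'{base}_{k}')
--             seen[base] = k + 1
--     return result
-- ===== Notes on version B (the rewrite author's own statement) =====
-- stated objective: simpler
-- what changed: A numbers duplicates by reversing the list twice and counting each name's counter down from total-1; B makes one forward pass over the list with a per-name 'seen' counter counting up from 0 (plus the same one-pass total count), with no reversals and no -1 sentinel.
import Mathlib
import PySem

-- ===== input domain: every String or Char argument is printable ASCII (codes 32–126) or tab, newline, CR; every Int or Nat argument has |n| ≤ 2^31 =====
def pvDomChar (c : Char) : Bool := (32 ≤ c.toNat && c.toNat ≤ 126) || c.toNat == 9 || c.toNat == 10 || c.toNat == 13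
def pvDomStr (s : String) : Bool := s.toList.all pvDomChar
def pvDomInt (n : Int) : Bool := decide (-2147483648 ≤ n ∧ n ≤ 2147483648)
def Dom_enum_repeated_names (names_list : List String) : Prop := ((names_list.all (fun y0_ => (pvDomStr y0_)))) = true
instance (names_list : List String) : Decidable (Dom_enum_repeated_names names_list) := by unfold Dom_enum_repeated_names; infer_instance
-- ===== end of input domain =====

-- B replaces A's reverse/count-down/reverse numbering pass by a single forward pass with a
-- per-name counter counting up (objective: simpler).

-- ===== PORT A =====
-- shared helper of both Pythons: erase_enum (identical source in Source A and Source B)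
-- while-loop of erase_enum: argument is i+1 (so 0 means i = -1, loop stopped)
def erase_enum_loop (name_list : List String) : Nat → Nat
  | 0 => 0
  | k + 1 => if PySem.Str.strIsdigit (name_list.getD k "") then erase_enum_loop name_list k else k + 1

def erase_enum (name : String) : String :=
  -- name.split('_'): sep "_" ≠ "" so split? is always some; .getD [] is exact here
  let name_list := (PySem.Str.split? name "_").getD []
  let j := erase_enum_loop name_list name_list.length
  PySem.Str.join "_" (PySem.List.slice name_list none (some (j : Int)))

-- first loop body of A (name already erased): append to aux_list, count in counts
def pvStepCount (st : PySem.Dict String Int × List String) (name : String) :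
    PySem.Dict String Int × List String :=
  (if st.1.contains name then st.1.modify name 0 (· + 1) else st.1.insert name 0, st.2 ++ [name])

-- 'for name in counts: if counts[name] == 0: counts[name] = -1'
def pvStepAdjust (d : PySem.Dict String Int) (name : String) : PySem.Dict String Int :=
  if d.getD name 0 == 0 then d.insert name (-1) else d

-- body of the enumerate loop over the reversed aux_list (in-place update = emit in order)
def pvStepLabel (st : PySem.Dict String Int × List String) (name : String) :
    PySem.Dict String Int × List String :=
  let c := st.1.getD name 0
  if c ≥ 0 then (st.1.insert name (c - 1), st.2 ++ [name ++ "_" ++ PySem.Int.toStr c])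
  else (st.1, st.2 ++ [name])

def enum_repeated_names (names_list : List String) : List String :=
  let st := names_list.foldl (fun st name => pvStepCount st (erase_enum name)) (PySem.Dict.empty, [])
  let counts := st.1.keys.foldl pvStepAdjust st.1
  let aux := st.2.reverse
  let st2 := aux.foldl pvStepLabel (counts, [])
  st2.2.reverse

-- ===== PORT B =====
-- totals[base] = totals.get(base, 0) + 1
def pvStepTotal (d : PySem.Dict String Int) (base : String) : PySem.Dict String Int :=
  d.insert base (d.getD base 0 + 1)

-- second loop body of B: emit base, or base_{seen} counting up
def pvStepB (totals : PySem.Dict String Int) (st : PySem.Dict String Int × List String)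
    (base : String) : PySem.Dict String Int × List String :=
  if totals.getD base 0 == 1 then (st.1, st.2 ++ [base])
  else (st.1.insert base (st.1.getD base 0 + 1),
        st.2 ++ [base ++ "_" ++ PySem.Int.toStr (st.1.getD base 0)])

def enum_repeated_names_alt (names_list : List String) : List String :=
  let totals := names_list.foldl (fun d n => pvStepTotal d (erase_enum n)) PySem.Dict.empty
  (names_list.foldl (fun st n => pvStepB totals st (erase_enum n)) (PySem.Dict.empty, [])).2

-- ===== PRECONDITION & SPEC =====
def Spec_enum_repeated_names (names_list : List String) (out : List String) : Prop := out = enum_repeated_names_alt names_list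
instance (names_list : List String) (out : List String) : Decidable (Spec_enum_repeated_names names_list out) := by unfold Spec_enum_repeated_names; infer_instance

-- ===== CLAIM (what is proved, stated in full; the proofs are below) =====
def Claim_equal_enum_repeated_names : Prop := ∀ (names_list : List String), Dom_enum_repeated_names names_list → Spec_enum_repeated_names names_list (enum_repeated_names names_list)

-- ===== LEMMAS AND PROOFS =====

-- the common specification: element-wise labelling; cnt is the total multiplicity,
-- pre the number of earlier occurrences of each (erased) name
def pvF (cnt : String → Int) (pre : String → Int) : List String → List String
  | [] => []
  | x :: xs =>
      (if cnt x = 1 then x else x ++ "_" ++ PySem.Int.toStr (pre x)) ::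
        pvF cnt (fun e => if e = x then pre e + 1 else pre e) xs



theorem pv_firstLoop (l : List String) (d : PySem.Dict String Int) (acc : List String)
    (hnd : d.keys.Nodup) :
    (l.foldl pvStepCount (d, acc)).2 = acc ++ l
    ∧ (∀ e, ((l.foldl pvStepCount (d, acc)).1).contains e = (d.contains e || decide (e ∈ l)))
    ∧ (∀ e, ((l.foldl pvStepCount (d, acc)).1).getD e 0
        = d.getD e 0 + l.count e - (if d.contains e = false ∧ e ∈ l then 1 else 0))
    ∧ ((l.foldl pvStepCount (d, acc)).1).keys.Nodup := by
  induction l generalizing d acc with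
  | nil => simpa using hnd
  | cons x xs ih =>
    simp only [List.foldl_cons]
    have hstep : pvStepCount (d, acc) x =
        ((if d.contains x then d.modify x 0 (· + 1) else d.insert x 0), acc ++ [x]) := rfl
    rw [hstep]
    set d1 := (if d.contains x then d.modify x 0 (· + 1) else d.insert x 0) with hd1
    have hd1c : ∀ e, d1.contains e = (e == x || d.contains e) := by
      intro e
      by_cases h : d.contains x
      · simp [hd1, h, PySem.Dict.contains_modify]
      · simp [hd1, h, PySem.Dict.contains_insert]
    have hd1v : ∀ e, d1.getD e 0 = if e = x then (if d.contains x then d.getD x 0 + 1 else 0)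
        else d.getD e 0 := by
      intro e
      by_cases h : d.contains x
      · simp [hd1, h, PySem.Dict.getD_modify]
      · simp [hd1, h, PySem.Dict.getD_insert]
    have hnd1 : d1.keys.Nodup := by
      by_cases h : d.contains x
      · simp only [hd1, h, if_true]
        rw [PySem.Dict.keys_modify d x 0 (· + 1)]
        exact PySem.Dict.nodup_keys_insert d x _ hnd
      · simp only [hd1, h]
        exact PySem.Dict.nodup_keys_insert d x 0 hnd
    obtain ⟨ho, hc, hv, hn⟩ := ih d1 (acc ++ [x]) hnd1
    refine ⟨by simpa using ho, ?_, ?_, hn⟩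
    · intro e
      rw [hc e, hd1c e]
      by_cases he : e = x
      · simp [he]
      · have hbeq : (e == x) = false := beq_eq_false_iff_ne.mpr he
        simp [hbeq, he]
    · intro e
      rw [hv e, hd1v e, hd1c e]
      by_cases he : e = x
      · subst he
        simp only [beq_self_eq_true, Bool.true_or]
        have hcnt : List.count e (e :: xs) = List.count e xs + 1 := by simp
        by_cases h : d.contains e
        · simp [h, hcnt]; ring
        · have h0 : d.getD e 0 = 0 := PySem.Dict.getD_of_not_contains d 0 (by simpa using h)
          simp [h, h0, hcnt]
      · have hbeq : (e == x) = false := beq_eq_false_iff_ne.mpr he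
        rw [if_neg he]
        have hcnt : List.count e (x :: xs) = List.count e xs := by simp [List.count_cons]; exact fun h => absurd h.symm he
        simp [hbeq, hcnt, he]

theorem pv_adjust (ks : List String) (d : PySem.Dict String Int) (hnd : ks.Nodup) (e : String) :
    (ks.foldl pvStepAdjust d).getD e 0
      = if e ∈ ks ∧ d.getD e 0 = 0 then -1 else d.getD e 0 := by
  induction ks generalizing d with
  | nil => simp
  | cons k ks ih =>
    have hk : k ∉ ks := (List.nodup_cons.mp hnd).1
    have hnd' : ks.Nodup := (List.nodup_cons.mp hnd).2
    simp only [List.foldl_cons]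
    have hstep : pvStepAdjust d k = if d.getD k 0 == 0 then d.insert k (-1) else d := rfl
    rw [hstep]
    set d1 := (if d.getD k 0 == 0 then d.insert k (-1) else d) with hd1
    have hd1v : ∀ e', d1.getD e' 0 =
        if e' = k ∧ d.getD k 0 = 0 then -1 else d.getD e' 0 := by
      intro e'
      by_cases h : d.getD k 0 = 0
      · simp [hd1, h, PySem.Dict.getD_insert]
      · have : (d.getD k 0 == 0) = false := by simpa using h
        simp [hd1, this, h]
    rw [ih d1 hnd', hd1v e]
    by_cases he : e = k
    · subst he
      simp [hk]
    · simp [he]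


theorem pv_passA (cnt : String → Int) (l : List String) (d : PySem.Dict String Int)
    (acc : List String) (pre : String → Int)
    (h1 : ∀ e ∈ l, cnt e ≠ 1 → d.getD e 0 = pre e + l.count e - 1)
    (h2 : ∀ e ∈ l, cnt e = 1 → d.getD e 0 = -1)
    (h3 : ∀ e, 0 ≤ pre e) :
    (l.reverse.foldl pvStepLabel (d, acc)).2 = acc ++ (pvF cnt pre l).reverse
    ∧ ∀ e, (l.reverse.foldl pvStepLabel (d, acc)).1.getD e 0
        = d.getD e 0 - (if cnt e = 1 then 0 else l.count e) := by
  induction l generalizing d acc pre with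
  | nil => simp [pvF]
  | cons x xs ih =>
    rw [List.reverse_cons, List.foldl_append]
    set pre' : String → Int := fun e => if e = x then pre e + 1 else pre e with hpre'
    have h1' : ∀ e ∈ xs, cnt e ≠ 1 → d.getD e 0 = pre' e + xs.count e - 1 := by
      intro e he hc
      rw [h1 e (List.mem_cons_of_mem x he) hc]
      by_cases hex : e = x
      · subst hex; simp [hpre', List.count_cons_self]; ring
      · simp [hpre', hex, List.count_cons, (beq_eq_false_iff_ne.mpr (fun h => hex h.symm) : (x == e) = false)]
    have h2' : ∀ e ∈ xs, cnt e = 1 → d.getD e 0 = -1 :=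
      fun e he hc => h2 e (List.mem_cons_of_mem x he) hc
    have h3' : ∀ e, 0 ≤ pre' e := by
      intro e; by_cases hex : e = x <;> simp [hpre', hex] <;> linarith [h3 e, h3 x]
    obtain ⟨ho, hdv⟩ := ih d acc pre' h1' h2' h3'
    set st1 := xs.reverse.foldl pvStepLabel (d, acc) with hst1
    have hd1x : st1.1.getD x 0 = d.getD x 0 - (if cnt x = 1 then 0 else xs.count x) := hdv x
    by_cases hc : cnt x = 1
    · -- counts[x] = -1, emit unchanged
      have hval : st1.1.getD x 0 = -1 := by
        rw [hd1x, h2 x (List.mem_cons_self) hc]; simp [hc]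
      have hstep : pvStepLabel st1 x = (st1.1, st1.2 ++ [x]) := by
        simp [pvStepLabel, hval]
      rw [List.foldl_cons, List.foldl_nil, hstep]
      constructor
      · simp only [ho]
        simp [pvF, hc, hpre']
      · intro e
        simp only
        rw [hdv e]
        by_cases hex : e = x
        · subst hex; simp [hc]
        · simp [List.count_cons, (beq_eq_false_iff_ne.mpr (fun h => hex h.symm) : (x == e) = false)]
    · -- counts[x] = pre x ≥ 0, emit x_{pre x}
      have hval : st1.1.getD x 0 = pre x := by
        rw [hd1x, h1 x (List.mem_cons_self) hc]
        simp [hc, List.count_cons_self]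
        ring
      have hge : st1.1.getD x 0 ≥ 0 := by rw [hval]; exact h3 x
      have hstep : pvStepLabel st1 x =
          (st1.1.insert x (st1.1.getD x 0 - 1), st1.2 ++ [x ++ "_" ++ PySem.Int.toStr (st1.1.getD x 0)]) := by
        simp [pvStepLabel, hge]
      rw [List.foldl_cons, List.foldl_nil, hstep]
      constructor
      · simp only [ho, hval]
        simp [pvF, hc, hpre']
      · intro e
        simp only [PySem.Dict.getD_insert]
        by_cases hex : e = x
        · subst hex
          rw [if_pos rfl]
          rw [hval, h1 e (List.mem_cons_self) hc]
          simp [hc, List.count_cons_self]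
          ring
        · rw [if_neg hex, hdv e]
          simp [List.count_cons, (beq_eq_false_iff_ne.mpr (fun h => hex h.symm) : (x == e) = false)]

theorem pv_passB (cnt : String → Int) (totals : PySem.Dict String Int) (l : List String)
    (seen : PySem.Dict String Int) (acc : List String) (pre : String → Int)
    (htot : ∀ e ∈ l, totals.getD e 0 = cnt e)
    (hseen : ∀ e, cnt e ≠ 1 → seen.getD e 0 = pre e) :
    (l.foldl (pvStepB totals) (seen, acc)).2 = acc ++ pvF cnt pre l := by
  induction l generalizing seen acc pre with
  | nil => simp [pvF]
  | cons x xs ih =>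
    rw [List.foldl_cons]
    have hx := htot x (List.mem_cons_self)
    by_cases hc : cnt x = 1
    · have hstep : pvStepB totals (seen, acc) x = (seen, acc ++ [x]) := by
        simp [pvStepB, hx, hc]
      rw [hstep, ih seen (acc ++ [x]) (fun e => if e = x then pre e + 1 else pre e)
        (fun e he => htot e (List.mem_cons_of_mem x he))
        (by intro e hce
            rw [hseen e hce]
            have : ¬ e = x := fun h => hce (h ▸ hc)
            simp [this])]
      simp [pvF, hc]
    · have hb : (totals.getD x 0 == 1) = false := by simp [hx, hc]
      have hk : seen.getD x 0 = pre x := hseen x hc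
      have hstep : pvStepB totals (seen, acc) x =
          (seen.insert x (pre x + 1), acc ++ [x ++ "_" ++ PySem.Int.toStr (pre x)]) := by
        simp [pvStepB, hb, hk]
      rw [hstep, ih _ _ (fun e => if e = x then pre e + 1 else pre e)
        (fun e he => htot e (List.mem_cons_of_mem x he))
        (by intro e hce
            rw [PySem.Dict.getD_insert]
            by_cases hex : e = x
            · simp [hex]
            · simp [hex, hseen e hce])]
      simp [pvF, hc]

-- ===== VERDICT (by name: the statement is the Claim_ definition above) =====
theorem enum_repeated_names_spec : Claim_equal_enum_repeated_names := by
  intro names_list _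
  unfold Spec_enum_repeated_names enum_repeated_names enum_repeated_names_alt
  simp only
  set E := names_list.map erase_enum with hE
  set cnt : String → Int := fun e => (E.count e : Int) with hcnt
  set pre0 : String → Int := fun _ => (0 : Int) with hpre0
  -- rewrite the three erase-inside folds as folds over E
  rw [show names_list.foldl (fun st name => pvStepCount st (erase_enum name))
        ((PySem.Dict.empty : PySem.Dict String Int), ([] : List String))
      = E.foldl pvStepCount (PySem.Dict.empty, []) by rw [hE, List.foldl_map]]
  rw [show names_list.foldl (fun d n => pvStepTotal d (erase_enum n))
        (PySem.Dict.empty : PySem.Dict String Int)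
      = E.foldl pvStepTotal PySem.Dict.empty by rw [hE, List.foldl_map]]
  set totals := E.foldl pvStepTotal PySem.Dict.empty with htotals
  rw [show names_list.foldl (fun st n => pvStepB totals st (erase_enum n))
        ((PySem.Dict.empty : PySem.Dict String Int), ([] : List String))
      = E.foldl (pvStepB totals) (PySem.Dict.empty, []) by rw [hE, List.foldl_map]]
  obtain ⟨hAo, hAc, hAv, hAn⟩ :=
    pv_firstLoop E PySem.Dict.empty [] (PySem.Dict.nodup_keys_empty)
  rw [hAo, List.nil_append]
  set C := (E.foldl pvStepCount (PySem.Dict.empty, [])).1 with hC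
  set C2 := C.keys.foldl pvStepAdjust C with hC2
  -- characterise C and C2 on members of E
  have hmem : ∀ e, e ∈ C.keys ↔ e ∈ E := by
    intro e
    rw [← PySem.Dict.contains_iff_mem_keys, hAc e]
    simp [PySem.Dict.contains_empty]
  have hCv : ∀ e ∈ E, C.getD e 0 = (E.count e : Int) - 1 := by
    intro e he
    rw [hAv e]
    simp [PySem.Dict.contains_empty, PySem.Dict.getD_empty, he]
  have hC2v : ∀ e ∈ E, C2.getD e 0 =
      if (E.count e : Int) = 1 then -1 else (E.count e : Int) - 1 := by
    intro e he
    rw [hC2, pv_adjust C.keys C hAn e]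
    have hek : e ∈ C.keys := (hmem e).mpr he
    rw [hCv e he]
    by_cases h1 : (E.count e : Int) = 1
    · simp [hek, h1]
    · have : ¬ ((E.count e : Int) - 1 = 0) := by omega
      simp [hek, this, h1]
  -- totals is the counter of E
  have htot : ∀ e, totals.getD e 0 = cnt e := by
    intro e
    have h0 : totals = E.foldl (fun d x => d.insert x (d.getD x 0 + 1)) PySem.Dict.empty := rfl
    rw [h0, PySem.Dict.getD_foldl_insert_add_one, PySem.Dict.getD_empty, hcnt]
    simp
  -- run both passes against the common specification pvF
  have hcountpos : ∀ e ∈ E, 1 ≤ (E.count e : Int) := by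
    intro e he
    exact_mod_cast List.count_pos_iff.mpr he
  obtain ⟨hApass, _⟩ := pv_passA cnt E C2 [] pre0
    (by intro e he hc1
        rw [hC2v e he]
        simp only [hcnt] at hc1 ⊢
        simp [hc1, hpre0])
    (by intro e he hc1
        rw [hC2v e he]
        simp only [hcnt] at hc1
        simp [hc1])
    (by intro e; simp [hpre0])
  have hBpass := pv_passB cnt totals E PySem.Dict.empty [] pre0 (fun e _ => htot e)
    (by intro e _; simp [PySem.Dict.getD_empty, hpre0])
  rw [hApass, hBpass, List.nil_append, List.nil_append, List.reverse_reverse]
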